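-- pv_equiv track=rewrite | github.com/nikprasanna/aoc | 2023/aoc3-2.py | populate_number_map
-- ===== SOURCE A (Python) =====
-- from typing import List, Tuple, Dict
--
-- def populate_number_map(row: str) -> Dict[Tuple, int]:
--     curr_num = ''
--     start_index = -1
--     row_map = {}
--
--     for i in range(len(row)):
--         c = row[i]
--         if c.isnumeric():
--             curr_num += c
--             if start_index == -1:
--                 start_index = i
--         else:
--             if curr_num:
--                 row_map[(start_index, i)] = curr_num
--
--             curr_num = ''
--             start_index = -1
--
--     if curr_num:
--         row_map[(start_index, i+1)] = curr_num
--
--     return row_map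
-- ===== SOURCE B (Python) =====
-- def populate_number_map(row: str):
--     row_map = {}
--     i, n = 0, len(row)
--     while i < n:
--         if row[i].isnumeric():
--             j = i
--             while j < n and row[j].isnumeric():
--                 j += 1
--             row_map[(i, j)] = row[i:j]
--             i = j
--         else:
--             i += 1
--     return row_map
-- ===== Notes on version B (the rewrite author's own statement) =====
-- stated objective: simpler
-- what changed: B replaces the char-accumulator with start_index==-1 sentinel and post-loop flush by a run-based scan: on hitting a digit it advances an inner index to the run's end and records the slice, so no per-char string building, no sentinel, no flush.
import Mathlib
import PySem

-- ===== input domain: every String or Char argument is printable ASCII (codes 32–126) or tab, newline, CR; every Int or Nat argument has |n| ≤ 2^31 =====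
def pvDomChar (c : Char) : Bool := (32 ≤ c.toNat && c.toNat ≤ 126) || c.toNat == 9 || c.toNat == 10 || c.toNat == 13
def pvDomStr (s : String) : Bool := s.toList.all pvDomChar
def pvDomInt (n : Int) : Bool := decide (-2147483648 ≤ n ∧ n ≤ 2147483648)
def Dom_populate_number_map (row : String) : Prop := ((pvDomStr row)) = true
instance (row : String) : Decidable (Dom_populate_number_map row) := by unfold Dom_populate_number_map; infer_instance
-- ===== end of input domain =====

-- B replaces A's char-by-char accumulator (start_index = -1 sentinel + post-loop flush) by a
-- run-based scan that jumps to the end of each digit run and records the slice; objective: simpler.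

-- ===== PORT A =====
-- str.isnumeric: on the printable-ASCII domain it coincides with isdigit (exact here).
-- A's `for i in range(len(row))` as recursion over the chars carrying the running index i;
-- the [] case is reached with i = len(row), which equals Python's post-loop flush index i+1
-- (and for an empty row neither flush fires, so the unbound-i branch is never taken).
-- The dict keys (start_index, i) of one run are pairwise distinct (start_index strictly
-- increases run to run), so the dict assignment is exactly an append.
def pvALoop : List Char → Int → String → Int → List (Int × Int × String) → List (Int × Int × String)
  | [], i, curr, start, m => if curr ≠ "" then m ++ [(start, i, curr)] else m
  | c :: cs, i, curr, start, m =>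
    if PySem.Chars.isdigit c then
      pvALoop cs (i + 1) (curr.push c) (if start = -1 then i else start) m
    else
      pvALoop cs (i + 1) "" (-1) (if curr ≠ "" then m ++ [(start, i, curr)] else m)


def populate_number_map (row : String) : List (Int × Int × String) :=
  pvALoop row.toList 0 "" (-1) []

-- ===== PORT B =====
-- Source B's outer while over i; the inner while advancing j to the end of the digit run is the
-- takeWhile/dropWhile split of the remaining chars, and row[i:j] is the run itself.
def pvBGo : List Char → Int → List (Int × Int × String)
  | [], _ => []
  | c :: cs, i =>
    if PySem.Chars.isdigit c then
      let run := c :: cs.takeWhile PySem.Chars.isdigit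
      (i, i + (run.length : Int), String.ofList run) ::
        pvBGo (cs.dropWhile PySem.Chars.isdigit) (i + (run.length : Int))
    else
      pvBGo cs (i + 1)
termination_by cs _ => cs.length
decreasing_by
  · simp only [List.length_cons]
    exact Nat.lt_succ_of_le (List.length_dropWhile_le _ _)
  · simp

def populate_number_map_alt (row : String) : List (Int × Int × String) :=
  pvBGo row.toList 0

-- ===== PRECONDITION & SPEC =====
def Spec_populate_number_map (row : String) (out : List (Int × Int × String)) : Prop := out = populate_number_map_alt row
instance (row : String) (out : List (Int × Int × String)) : Decidable (Spec_populate_number_map row out) := by unfold Spec_populate_number_map; infer_instance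

-- ===== CLAIM (what is proved, stated in full; the proofs are below) =====
def Claim_equal_populate_number_map : Prop := ∀ (row : String), Dom_populate_number_map row → Spec_populate_number_map row (populate_number_map row)

-- ===== LEMMAS AND PROOFS =====

lemma pvOfList_ne_empty (pre : List Char) (h : pre ≠ []) : String.ofList pre ≠ "" := by
  simpa using h

lemma pvPush_ofList (pre : List Char) (c : Char) :
    (String.ofList pre).push c = String.ofList (pre ++ [c]) := by
  apply String.toList_injective; simp

lemma pvPush_empty (c : Char) : ("" : String).push c = String.ofList [c] := by
  apply String.toList_injective; simp

lemma pvMain : ∀ (n : ℕ) (cs : List Char), cs.length ≤ n →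
    (∀ (i : Int) (m : List (Int × Int × String)), 0 ≤ i →
      pvALoop cs i "" (-1) m = m ++ pvBGo cs i) ∧
    (∀ (pre : List Char) (i start : Int) (m : List (Int × Int × String)), pre ≠ [] → 0 ≤ i → 0 ≤ start →
      pvALoop cs i (String.ofList pre) start m =
        m ++ (start, i + ((cs.takeWhile PySem.Chars.isdigit).length : Int),
               String.ofList (pre ++ cs.takeWhile PySem.Chars.isdigit)) ::
          pvBGo (cs.dropWhile PySem.Chars.isdigit)
                (i + ((cs.takeWhile PySem.Chars.isdigit).length : Int))) := by
  intro n
  induction n with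
  | zero =>
    intro cs hcs
    have : cs = [] := List.length_eq_zero_iff.mp (Nat.le_zero.mp hcs)
    subst this
    refine ⟨fun i m _ => by simp [pvALoop, pvBGo], fun pre i start m hpre _ _ => ?_⟩
    simp [pvALoop, pvBGo, pvOfList_ne_empty pre hpre]
  | succ k ih =>
    intro cs hcs
    match cs with
    | [] =>
      refine ⟨fun i m _ => by simp [pvALoop, pvBGo], fun pre i start m hpre _ _ => ?_⟩
      simp [pvALoop, pvBGo, pvOfList_ne_empty pre hpre]
    | c :: cs' =>
      have hlen : cs'.length ≤ k := by simpa using hcs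
      constructor
      · intro i m hi
        by_cases hd : PySem.Chars.isdigit c = true
        · have hrun := (ih cs' hlen).2 [c] (i + 1) i m (by simp) (by omega) hi
          rw [show pvALoop (c :: cs') i "" (-1) m
              = pvALoop cs' (i + 1) (String.ofList [c]) i m from by
            simp [pvALoop, hd, pvPush_empty]]
          rw [hrun]
          simp only [pvBGo, hd, if_true, List.length_cons]
          rw [show i + 1 + ((cs'.takeWhile PySem.Chars.isdigit).length : Int)
              = i + (((cs'.takeWhile PySem.Chars.isdigit).length + 1 : ℕ) : Int) from by
            push_cast; ring]
          simp
        · have hd' : PySem.Chars.isdigit c = false := by simpa using hd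
          have hidle := (ih cs' hlen).1 (i + 1) m (by omega)
          rw [show pvALoop (c :: cs') i "" (-1) m = pvALoop cs' (i + 1) "" (-1) m from by
            simp [pvALoop, hd']]
          rw [hidle, show pvBGo (c :: cs') i = pvBGo cs' (i + 1) from by simp [pvBGo, hd']]
      · intro pre i start m hpre hi hstart
        by_cases hd : PySem.Chars.isdigit c = true
        · have hrun := (ih cs' hlen).2 (pre ++ [c]) (i + 1) start m (by simp) (by omega) hstart
          rw [show pvALoop (c :: cs') i (String.ofList pre) start m
              = pvALoop cs' (i + 1) (String.ofList (pre ++ [c])) start m from by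
            rw [show pvALoop (c :: cs') i (String.ofList pre) start m
                = pvALoop cs' (i + 1) ((String.ofList pre).push c)
                    (if start = -1 then i else start) m from by simp [pvALoop, hd]]
            rw [pvPush_ofList, if_neg (by omega)]]
          rw [hrun]
          simp only [List.takeWhile_cons, List.dropWhile_cons, hd, if_true, List.length_cons]
          rw [show i + 1 + ((cs'.takeWhile PySem.Chars.isdigit).length : Int)
              = i + (((cs'.takeWhile PySem.Chars.isdigit).length + 1 : ℕ) : Int) from by
            push_cast; ring]
          rw [show pre ++ [c] ++ cs'.takeWhile PySem.Chars.isdigit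
              = pre ++ c :: cs'.takeWhile PySem.Chars.isdigit from by simp]
        · have hd' : PySem.Chars.isdigit c = false := by simpa using hd
          have hidle := (ih cs' hlen).1 (i + 1) (m ++ [(start, i, String.ofList pre)]) (by omega)
          rw [show pvALoop (c :: cs') i (String.ofList pre) start m
              = pvALoop cs' (i + 1) "" (-1) (m ++ [(start, i, String.ofList pre)]) from by
            simp [pvALoop, hd', pvOfList_ne_empty pre hpre]]
          rw [hidle]
          simp [pvBGo, hd']

-- ===== VERDICT (by name: the statement is the Claim_ definition above) =====
theorem populate_number_map_spec : Claim_equal_populate_number_map := by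
  intro row _
  unfold Spec_populate_number_map populate_number_map populate_number_map_alt
  exact (pvMain row.toList.length row.toList le_rfl).1 0 [] (by norm_num)
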